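-- pv_equiv track=rewrite | github.com/kazuhiko1979/edabit | Burglary Series (23)_Find and Remove.py | find_and_remove
-- ===== SOURCE A (Python) =====
-- def find_and_remove(dct):
--
--     remove_list_categories = []
--     remove_list_items = []
--
--     for categories, goods in dct.items():
--         for good in goods.items():
--             if not good[1].isdigit():
--                 remove_list_categories.append(categories)
--                 remove_list_items.append(good[0])
--             else:
--                 dct[categories][good[0]] = int(dct[categories][good[0]])
--
--     # return remove_helper(remove_list_categories, remove_list_items, dct)
--
--
-- # def remove_helper(categories, items, dct):
--
--     # for c, i in zip(categories, items):
--
--     for c, i in zip(remove_list_categories, remove_list_items):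
--         del dct[c][i]
--
--     return dct
-- ===== SOURCE B (Python) =====
-- def find_and_remove(dct):
--     # Single pass: rebuild each category's inner dict, keeping only digit-valued
--     # entries converted to int.  Mutates dct in place (reassigns each category's
--     # value) and returns it, like the original.
--     for cat, goods in dct.items():
--         dct[cat] = {k: int(v) for k, v in goods.items() if v.isdigit()}
--     return dct
-- ===== Notes on version B (the rewrite author's own statement) =====
-- stated objective: simpler
-- what changed: Replaces A's two-phase scheme (convert digit values in place while accumulating two parallel remove-lists, then a second deletion pass driven by zip) with a single pass that rebuilds each category's inner dict by one filtering/converting comprehension; the remove-lists and the deletion pass disappear.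
import Mathlib
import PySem

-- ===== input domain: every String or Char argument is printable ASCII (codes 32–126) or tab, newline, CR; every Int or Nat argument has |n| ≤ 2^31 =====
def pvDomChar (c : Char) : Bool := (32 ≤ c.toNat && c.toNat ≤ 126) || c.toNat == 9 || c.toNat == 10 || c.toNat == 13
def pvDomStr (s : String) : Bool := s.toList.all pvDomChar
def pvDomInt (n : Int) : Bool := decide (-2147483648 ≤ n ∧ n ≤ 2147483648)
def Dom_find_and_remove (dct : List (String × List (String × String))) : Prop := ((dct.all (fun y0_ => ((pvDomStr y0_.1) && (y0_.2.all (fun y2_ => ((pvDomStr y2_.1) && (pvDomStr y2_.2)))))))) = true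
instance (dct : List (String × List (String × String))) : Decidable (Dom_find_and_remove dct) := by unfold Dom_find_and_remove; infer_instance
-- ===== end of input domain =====

-- B replaces A's convert-in-place pass + two parallel remove-lists + zip deletion pass
-- with one filtering/converting pass per category (objective: simpler).  Both Pythons
-- mutate the argument dict in place; the equivalence proved is about the RETURN value.


-- ===== PORT A =====
-- A mutates a dict-of-dicts: values are strings until converted, ints afterwards,
-- so the working cell type is String ⊕ Int (inl = still a str, inr = already int).
abbrev PvCell := String ⊕ Int

-- int(x) on a cell; the .getD 0 branch is unreachable on reached inputs (the string
-- was checked .isdigit(), so int() cannot raise ValueError there).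
def pvCellInt (x : PvCell) : Int :=
  match x with
  | .inl s => (PySem.Int.ofStr? s).getD 0
  | .inr n => n

abbrev PvDD := PySem.Dict String (PySem.Dict String PvCell)

-- body of A's first loop, for the current category `c` and item `q` (iteration reads
-- each value before its own update, so `q` carries the original string value);
-- state = ((remove_list_categories, remove_list_items), the live dict)
def pass1Step (c : String) (st : (List String × List String) × PvDD) (q : String × String) :
    (List String × List String) × PvDD :=
  if ¬ PySem.Str.strIsdigit q.2 then
    ((st.1.1 ++ [c], st.1.2 ++ [q.1]), st.2)
  else
    -- dct[c][q[0]] = int(dct[c][q[0]])  (live read; the defaults are unreachable: c and q.1 are present)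
    (st.1, st.2.modify c PySem.Dict.empty
      (fun g => g.insert q.1 (Sum.inr (pvCellInt (g.getD q.1 (Sum.inl ""))))))

-- body of A's second loop: del dct[c][i]  (the key is always present, so modify = in-place erase)
def pass2Step (d : PvDD) (ci : String × String) : PvDD :=
  d.modify ci.1 PySem.Dict.empty (fun g => g.erase ci.2)

def find_and_remove (dct : List (String × List (String × String))) : List (String × List (String × Int)) :=
  -- dct as a Python dict-of-dicts, every value still a string (inl)
  let d0 : PvDD := PySem.Dict.mk (dct.map (fun p => (p.1, PySem.Dict.mk (p.2.map (fun q => (q.1, (Sum.inl q.2 : PvCell)))))))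
  -- first loop: build remove_list_categories / remove_list_items and convert digit values in place
  let st := dct.foldl (fun st p => p.2.foldl (pass1Step p.1) st) ((([] : List String), ([] : List String)), d0)
  -- second loop: for c, i in zip(...): del dct[c][i]
  let d1 := (st.1.1.zip st.1.2).foldl pass2Step st.2
  -- returned dict: every surviving cell was converted (inr); pvCellInt extracts it
  d1.items.map (fun p => (p.1, p.2.items.map (fun q => (q.1, pvCellInt q.2))))

-- ===== PORT B =====
def find_and_remove_alt (dct : List (String × List (String × String))) : List (String × List (String × Int)) :=
  -- for each category, the comprehension {k: int(v) for k, v in goods.items() if v.isdigit()}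
  -- (int() cannot raise after isdigit, so the .getD 0 default is unreachable)
  dct.map (fun p => (p.1, p.2.filterMap (fun q =>
    if PySem.Str.strIsdigit q.2 then some (q.1, (PySem.Int.ofStr? q.2).getD 0) else none)))

-- ===== PRECONDITION & SPEC =====
-- Pre_ excludes association lists with duplicate category keys or duplicate item keys
-- inside a category: such lists cannot arise from a Python dict (dict keys are unique),
-- so they carry no Python behaviour to match.
def Pre_find_and_remove (dct : List (String × List (String × String))) : Prop :=
  (dct.map (·.1)).Nodup ∧ ∀ p ∈ dct, (p.2.map (·.1)).Nodup
instance (dct : List (String × List (String × String))) : Decidable (Pre_find_and_remove dct) := by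
  unfold Pre_find_and_remove; infer_instance

def pvWitness_find_and_remove : (List (String × List (String × String))) :=
  [("food", [("bread", "4"), ("milk", "two"), ("cheese", "10")]), ("tools", [("saw", "2")])]

def Spec_find_and_remove (dct : List (String × List (String × String))) (out : List (String × List (String × Int))) : Prop := out = find_and_remove_alt dct
instance (dct : List (String × List (String × String))) (out : List (String × List (String × Int))) : Decidable (Spec_find_and_remove dct out) := by unfold Spec_find_and_remove; infer_instance

-- ===== CLAIM (what is proved, stated in full; the proofs are below) =====
def Claim_equal_find_and_remove : Prop := ∀ (dct : List (String × List (String × String))), Dom_find_and_remove dct → Pre_find_and_remove dct → Spec_find_and_remove dct (find_and_remove dct)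

-- ===== LEMMAS AND PROOFS =====

-- value-tagging / conversion of one item, and the per-category shapes of the working dict
def pvTag (q : String × String) : String × PvCell := (q.1, Sum.inl q.2)
def pvConv (q : String × String) : String × PvCell :=
  (q.1, if PySem.Str.strIsdigit q.2 then Sum.inr ((PySem.Int.ofStr? q.2).getD 0) else Sum.inl q.2)
def pvF (p : String × List (String × String)) : String × PySem.Dict String PvCell :=
  (p.1, PySem.Dict.mk (p.2.map pvTag))
def pvG (p : String × List (String × String)) : String × PySem.Dict String PvCell :=
  (p.1, PySem.Dict.mk (p.2.map pvConv))
def pvH (p : String × List (String × String)) : String × PySem.Dict String PvCell :=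
  (p.1, PySem.Dict.mk ((p.2.filter (fun q => PySem.Str.strIsdigit q.2)).map pvConv))
def pvBadC (l : List (String × List (String × String))) : List String :=
  l.flatMap (fun p => (p.2.filter (fun q => ¬ PySem.Str.strIsdigit q.2)).map (fun _ => p.1))
def pvBadI (l : List (String × List (String × String))) : List String :=
  l.flatMap (fun p => (p.2.filter (fun q => ¬ PySem.Str.strIsdigit q.2)).map (·.1))
def pvBadP (l : List (String × List (String × String))) : List (String × String) :=
  l.flatMap (fun p => (p.2.filter (fun q => ¬ PySem.Str.strIsdigit q.2)).map (fun q => (p.1, q.1)))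
lemma pv_get?_mk_append {ν : Type} (pre l : List (String × ν)) (k : String)
    (h : k ∉ pre.map (·.1)) :
    (PySem.Dict.mk (pre ++ l)).get? k = (PySem.Dict.mk l).get? k := by
  induction pre with
  | nil => rfl
  | cons x xs ih =>
    simp only [List.map_cons, List.mem_cons, not_or] at h
    rw [List.cons_append, PySem.Dict.get?_mk_cons]
    simp only [beq_iff_eq]
    rw [if_neg (fun he => h.1 he.symm)]
    exact ih h.2

lemma pv_insert_mk_middle {ν : Type} (l₁ l₂ : List (String × ν)) (k : String) (w v : ν)
    (h₁ : k ∉ l₁.map (·.1)) (h₂ : k ∉ l₂.map (·.1)) :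
    (PySem.Dict.mk (l₁ ++ (k, w) :: l₂)).insert k v = PySem.Dict.mk (l₁ ++ (k, v) :: l₂) := by
  have hc : (PySem.Dict.mk (l₁ ++ (k, w) :: l₂)).contains k = true := by
    rw [PySem.Dict.contains_iff_mem_keys]
    simp [PySem.Dict.keys]
  rw [PySem.Dict.insert, if_pos hc]
  congr 1
  simp only [List.map_append, List.map_cons, beq_self_eq_true]
  congr 1
  · rw [List.map_congr_left (g := id) (fun p hp => by
      simp only [beq_iff_eq, id]
      exact if_neg (fun (he : p.1 = k) => h₁ (he ▸ List.mem_map_of_mem hp))), List.map_id]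
  · congr 1
    rw [List.map_congr_left (g := id) (fun p hp => by
      simp only [beq_iff_eq, id]
      exact if_neg (fun (he : p.1 = k) => h₂ (he ▸ List.mem_map_of_mem hp))), List.map_id]
lemma pv_insert_self {ν : Type} (d : PySem.Dict String ν) (k : String) (v : ν)
    (h : d.get? k = some v) (hnd : d.keys.Nodup) : d.insert k v = d := by
  have hc : d.contains k = true := by
    rw [PySem.Dict.contains_eq_isSome_get?, h]; rfl
  have hm : (k, v) ∈ d.items := PySem.Dict.mem_items_of_get?_eq_some d h
  rw [PySem.Dict.insert, if_pos hc]
  cases d with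
  | mk items =>
    congr 1
    rw [List.map_congr_left (g := id) (fun p hp => by
      simp only [beq_iff_eq, id]
      split_ifs with he
      · exact List.inj_on_of_nodup_map hnd hm hp (by simp [he])
      · rfl), List.map_id]

lemma pv_foldl_erase {ν : Type} (ks : List String) :
    ∀ (items : List (String × ν)),
    ks.foldl (fun g k => g.erase k) (PySem.Dict.mk items) =
      PySem.Dict.mk (items.filter (fun e => ¬ ks.contains e.1)) := by
  induction ks with
  | nil => intro items; simp
  | cons k ks ih =>
    intro items
    rw [List.foldl_cons]
    show ks.foldl _ (PySem.Dict.mk (items.filter _)) = _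
    rw [ih, List.filter_filter]
    congr 1
    apply List.filter_congr
    intro e _
    by_cases hk : e.1 = k <;> simp [hk, Bool.and_comm]

lemma pv_eq_of_nodup_keys {ν : Type} {l : List (String × ν)} (h : (l.map (·.1)).Nodup)
    {p q : String × ν} (hp : p ∈ l) (hq : q ∈ l) (hk : p.1 = q.1) : p = q :=
  List.inj_on_of_nodup_map h hp hq hk

lemma pv_pass1_inner (c : String) (g : List (String × String)) :
    ∀ (pre : List (String × PvCell)) (rc ri : List String) (D : PvDD),
    D.keys.Nodup →
    D.get? c = some (PySem.Dict.mk (pre ++ g.map pvTag)) →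
    ((pre ++ g.map pvTag).map (·.1)).Nodup →
    g.foldl (pass1Step c) ((rc, ri), D) =
      ((rc ++ (g.filter (fun q => ¬ PySem.Str.strIsdigit q.2)).map (fun _ => c),
        ri ++ (g.filter (fun q => ¬ PySem.Str.strIsdigit q.2)).map (·.1)),
       D.insert c (PySem.Dict.mk (pre ++ g.map pvConv))) := by
  induction g with
  | nil =>
    intro pre rc ri D hnd h hk
    simp only [List.map_nil, List.append_nil] at h ⊢
    simp only [List.foldl_nil, List.filter_nil, List.map_nil, List.append_nil]
    rw [pv_insert_self D c _ h hnd]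
  | cons q g ih =>
    intro pre rc ri D hnd h hk
    have hkeys : ((pre ++ (q :: g).map pvTag).map (·.1))
        = pre.map (·.1) ++ q.1 :: g.map (·.1) := by
      simp [pvTag, List.map_map, Function.comp_def]
    rw [hkeys] at hk
    have hq1pre : q.1 ∉ pre.map (·.1) := by
      intro hmem
      exact (List.disjoint_of_nodup_append hk) hmem (by simp)
    have hq1g : q.1 ∉ g.map (·.1) := by
      have := (List.nodup_append.mp hk).2.1
      simp only [List.nodup_cons] at this
      exact this.1
    rw [List.foldl_cons]
    by_cases hd : PySem.Str.strIsdigit q.2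
    · -- digit: convert in place
      have hstep : pass1Step c ((rc, ri), D) q =
          ((rc, ri), D.insert c (PySem.Dict.mk ((pre ++ [pvConv q]) ++ g.map pvTag))) := by
        have hgd : D.getD c PySem.Dict.empty
            = PySem.Dict.mk (pre ++ (q.1, (Sum.inl q.2 : PvCell)) :: g.map pvTag) := by
          rw [PySem.Dict.getD_eq_get?_getD, h]; rfl
        have hget : (PySem.Dict.mk (pre ++ (q.1, (Sum.inl q.2 : PvCell)) :: g.map pvTag)).getD
            q.1 (Sum.inl "") = Sum.inl q.2 := by
          rw [PySem.Dict.getD_eq_get?_getD, pv_get?_mk_append _ _ _ hq1pre,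
              PySem.Dict.get?_mk_cons]
          simp
        rw [pass1Step, if_neg (not_not_intro hd), PySem.Dict.modify, hgd, hget]
        rw [pv_insert_mk_middle pre (g.map pvTag) q.1 _ _ hq1pre
          (by simpa [pvTag, List.map_map, Function.comp_def] using hq1g)]
        have hd' : PySem.Chars.strIsdigit q.2.toList = true := by simpa using hd
        simp [pvConv, hd', pvCellInt, List.append_assoc]
      rw [hstep]
      have hcont : D.contains c = true := by
        rw [PySem.Dict.contains_eq_isSome_get?, h]; rfl
      have hnd' : (D.insert c (PySem.Dict.mk ((pre ++ [pvConv q]) ++ g.map pvTag))).keys.Nodup := by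
        rw [PySem.Dict.keys_insert_of_contains _ _ hcont]; exact hnd
      rw [ih (pre ++ [pvConv q]) rc ri _ hnd' (PySem.Dict.get?_insert_self _ _ _)
        (by simpa [pvConv, pvTag, List.map_map, Function.comp_def] using hk)]
      rw [PySem.Dict.insert_insert_self]
      have hd' : PySem.Chars.strIsdigit q.2.toList = true := by simpa using hd
      simp [hd', pvConv, List.append_assoc]
    · -- not a digit: record (c, q.1) for removal
      have hstep : pass1Step c ((rc, ri), D) q = ((rc ++ [c], ri ++ [q.1]), D) := by
        rw [pass1Step, if_pos hd]
      rw [hstep]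
      rw [ih (pre ++ [pvTag q]) (rc ++ [c]) (ri ++ [q.1]) D hnd
        (by simpa [List.append_assoc] using h)
        (by simpa [pvTag, List.map_map, Function.comp_def] using hk)]
      have hd' : ¬ PySem.Chars.strIsdigit q.2.toList = true := by simpa using hd
      have hconv : (pvConv q : String × PvCell) = pvTag q := by
        simp [pvConv, pvTag, hd']
      simp [hd', hconv, List.append_assoc]

lemma pv_pass1_outer (l : List (String × List (String × String))) :
    ∀ (pre : List (String × PySem.Dict String PvCell)) (rc ri : List String),
    ((pre.map (·.1) ++ l.map (·.1)).Nodup) →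
    (∀ p ∈ l, (p.2.map (·.1)).Nodup) →
    l.foldl (fun st p => p.2.foldl (pass1Step p.1) st) ((rc, ri), PySem.Dict.mk (pre ++ l.map pvF)) =
      ((rc ++ pvBadC l, ri ++ pvBadI l), PySem.Dict.mk (pre ++ l.map pvG)) := by
  induction l with
  | nil => intro pre rc ri _ _; simp [pvBadC, pvBadI]
  | cons p l ih =>
    intro pre rc ri hk hin
    rw [show (pre.map (·.1) ++ (p :: l).map (·.1)) =
        pre.map (·.1) ++ p.1 :: l.map (·.1) by simp] at hk
    have hp1pre : p.1 ∉ pre.map (·.1) := by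
      intro hmem; exact (List.disjoint_of_nodup_append hk) hmem (by simp)
    have hp1l : p.1 ∉ l.map (·.1) := by
      have := (List.nodup_append.mp hk).2.1
      simp only [List.nodup_cons] at this
      exact this.1
    have hFkeys : p.1 ∉ (l.map pvF).map (·.1) := by
      simpa [pvF, List.map_map, Function.comp_def] using hp1l
    have hndD : (PySem.Dict.mk (pre ++ (p :: l).map pvF)).keys.Nodup := by
      simpa [PySem.Dict.keys, pvF, List.map_map, Function.comp_def] using hk
    have hget : (PySem.Dict.mk (pre ++ (p :: l).map pvF)).get? p.1
        = some (PySem.Dict.mk ([] ++ p.2.map pvTag)) := by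
      rw [List.map_cons, show (pvF p : String × PySem.Dict String PvCell)
            = (p.1, PySem.Dict.mk (p.2.map pvTag)) from rfl,
          pv_get?_mk_append _ _ _ hp1pre, PySem.Dict.get?_mk_cons]
      simp
    rw [List.foldl_cons]
    rw [pv_pass1_inner p.1 p.2 [] rc ri _ hndD hget
      (by simpa [pvTag, List.map_map, Function.comp_def] using hin p (by simp))]
    rw [List.map_cons, show (pvF p : String × PySem.Dict String PvCell)
          = (p.1, PySem.Dict.mk (p.2.map pvTag)) from rfl,
        pv_insert_mk_middle pre (l.map pvF) p.1 _ _ hp1pre hFkeys]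
    rw [show (pre ++ (p.1, PySem.Dict.mk ([] ++ p.2.map pvConv)) :: l.map pvF)
          = (pre ++ [pvG p]) ++ l.map pvF by simp [pvG]]
    rw [ih (pre ++ [pvG p]) _ _
      (by simpa [pvG, List.append_assoc] using hk) (fun p hp => hin p (by simp [hp]))]
    simp [pvBadC, pvBadI, pvG, List.append_assoc]

lemma pv_zip_bad (l : List (String × List (String × String))) :
    (pvBadC l).zip (pvBadI l) = pvBadP l := by
  induction l with
  | nil => rfl
  | cons p l ih =>
    show (((p.2.filter _).map _ ++ pvBadC l).zip ((p.2.filter _).map _ ++ pvBadI l)) = _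
    rw [List.zip_append (by simp), ih]
    have : ((p.2.filter (fun q => ¬ PySem.Str.strIsdigit q.2)).map (fun _ => p.1)).zip
        ((p.2.filter (fun q => ¬ PySem.Str.strIsdigit q.2)).map (·.1))
        = (p.2.filter (fun q => ¬ PySem.Str.strIsdigit q.2)).map (fun q => (p.1, q.1)) :=
      List.zip_map'
    rw [this]
    rfl

lemma pv_pass2_block (ks : List String) (c : String) :
    ∀ (D : PvDD) (g₀ : PySem.Dict String PvCell),
    D.get? c = some g₀ → D.keys.Nodup →
    (ks.map (fun k => (c, k))).foldl pass2Step D =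
      D.insert c (ks.foldl (fun g k => g.erase k) g₀) := by
  induction ks with
  | nil =>
    intro D g₀ h hnd
    simp only [List.map_nil, List.foldl_nil]
    exact (pv_insert_self D c g₀ h hnd).symm
  | cons k ks ih =>
    intro D g₀ h hnd
    have hcont : D.contains c = true := by
      rw [PySem.Dict.contains_eq_isSome_get?, h]; rfl
    have hstep : pass2Step D (c, k) = D.insert c (g₀.erase k) := by
      rw [pass2Step, PySem.Dict.modify, PySem.Dict.getD_eq_get?_getD, h]
      rfl
    rw [List.map_cons, List.foldl_cons, hstep,
        ih _ _ (PySem.Dict.get?_insert_self _ _ _)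
          (by rw [PySem.Dict.keys_insert_of_contains _ _ hcont]; exact hnd),
        PySem.Dict.insert_insert_self, List.foldl_cons]

lemma pv_pass2_outer (l : List (String × List (String × String))) :
    ∀ (pre : List (String × PySem.Dict String PvCell)),
    ((pre.map (·.1) ++ l.map (·.1)).Nodup) →
    (∀ p ∈ l, (p.2.map (·.1)).Nodup) →
    (pvBadP l).foldl pass2Step (PySem.Dict.mk (pre ++ l.map pvG)) =
      PySem.Dict.mk (pre ++ l.map pvH) := by
  induction l with
  | nil => intro pre _ _; rfl
  | cons p l ih =>
    intro pre hk hin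
    rw [show (pre.map (·.1) ++ (p :: l).map (·.1)) =
        pre.map (·.1) ++ p.1 :: l.map (·.1) by simp] at hk
    have hp1pre : p.1 ∉ pre.map (·.1) := by
      intro hmem; exact (List.disjoint_of_nodup_append hk) hmem (by simp)
    have hp1l : p.1 ∉ l.map (·.1) := by
      have := (List.nodup_append.mp hk).2.1
      simp only [List.nodup_cons] at this
      exact this.1
    have hGkeys : p.1 ∉ (l.map pvG).map (·.1) := by
      simpa [pvG, List.map_map, Function.comp_def] using hp1l
    have hndD : (PySem.Dict.mk (pre ++ (p :: l).map pvG)).keys.Nodup := by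
      simpa [PySem.Dict.keys, pvG, List.map_map, Function.comp_def] using hk
    have hget : (PySem.Dict.mk (pre ++ (p :: l).map pvG)).get? p.1
        = some (PySem.Dict.mk (p.2.map pvConv)) := by
      rw [List.map_cons, show (pvG p : String × PySem.Dict String PvCell)
            = (p.1, PySem.Dict.mk (p.2.map pvConv)) from rfl,
          pv_get?_mk_append _ _ _ hp1pre, PySem.Dict.get?_mk_cons]
      simp
    have hblock : pvBadP (p :: l) =
        ((p.2.filter (fun q => ¬ PySem.Str.strIsdigit q.2)).map (·.1)).map (fun k => (p.1, k))
          ++ pvBadP l := by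
      simp [pvBadP, List.map_map, Function.comp_def]
    rw [hblock, List.foldl_append,
        pv_pass2_block _ p.1 _ _ hget hndD, pv_foldl_erase]
    have hfilter : ((p.2.map pvConv).filter
          (fun e => ¬ ((p.2.filter (fun q => ¬ PySem.Str.strIsdigit q.2)).map (·.1)).contains e.1))
        = (p.2.filter (fun q => PySem.Str.strIsdigit q.2)).map pvConv := by
      rw [List.filter_map]
      congr 1
      apply List.filter_congr
      intro q hq
      have hk1 : (pvConv q).1 = q.1 := rfl
      by_cases hdq : PySem.Str.strIsdigit q.2
      · have : q.1 ∉ (p.2.filter (fun q => ¬ PySem.Str.strIsdigit q.2)).map (·.1) := by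
          intro hmem
          obtain ⟨q', hq', he⟩ := List.mem_map.mp hmem
          obtain ⟨hq'mem, hq'nd⟩ := List.mem_filter.mp hq'
          have heq := pv_eq_of_nodup_keys (hin p (by simp)) hq hq'mem (by rw [he])
          rw [heq] at hdq
          exact absurd hdq (by simpa using hq'nd)
        have hc1 : (pvConv q).1 = q.1 := rfl
        simp only [Function.comp_def, hc1, List.contains_eq_mem]
        simp only [PySem.Str.strIsdigit_eq] at hdq
        simp [hdq]
        intro x hx
        have heq2 := pv_eq_of_nodup_keys (hin p (by simp)) hx hq rfl
        have hx2 : x = q.2 := congrArg Prod.snd heq2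
        rw [hx2]; exact hdq
      · have : q.1 ∈ (p.2.filter (fun q => ¬ PySem.Str.strIsdigit q.2)).map (·.1) :=
          List.mem_map.mpr ⟨q, List.mem_filter.mpr ⟨hq, by simpa using hdq⟩, rfl⟩
        have hc1 : (pvConv q).1 = q.1 := rfl
        simp only [Function.comp_def, hc1, List.contains_eq_mem]
        simp only [PySem.Str.strIsdigit_eq] at hdq
        simp [hdq]
        exact ⟨q.2, by simpa using hq, by simpa using hdq⟩
    rw [hfilter]
    rw [List.map_cons, show (pvG p : String × PySem.Dict String PvCell)
          = (p.1, PySem.Dict.mk (p.2.map pvConv)) from rfl,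
        pv_insert_mk_middle pre (l.map pvG) p.1 _ _ hp1pre hGkeys]
    rw [show (pre ++ (p.1, PySem.Dict.mk ((p.2.filter (fun q => PySem.Str.strIsdigit q.2)).map pvConv)) :: l.map pvG)
          = (pre ++ [pvH p]) ++ l.map pvG by simp [pvH]]
    rw [ih (pre ++ [pvH p])
      (by simpa [pvH, List.append_assoc] using hk) (fun p hp => hin p (by simp [hp]))]
    simp [pvH, List.append_assoc]

lemma pv_filterMap_if {α β : Type} (p : α → Bool) (f : α → β) (l : List α) :
    l.filterMap (fun a => if p a then some (f a) else none) = (l.filter p).map f := by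
  induction l with
  | nil => rfl
  | cons a l ih => by_cases h : p a <;> simp [h, ih]

theorem pv_main (dct : List (String × List (String × String)))
    (h1 : (dct.map (·.1)).Nodup) (h2 : ∀ p ∈ dct, (p.2.map (·.1)).Nodup) :
    find_and_remove dct = find_and_remove_alt dct := by
  have hnodup0 : ((([] : List (String × PySem.Dict String PvCell)).map (·.1))
      ++ dct.map (·.1)).Nodup := by simpa using h1
  simp only [find_and_remove, find_and_remove_alt]
  rw [show (dct.map (fun p => (p.1, PySem.Dict.mk (p.2.map (fun q => (q.1, (Sum.inl q.2 : PvCell)))))))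
        = [] ++ dct.map pvF from rfl]
  rw [pv_pass1_outer dct [] [] [] hnodup0 h2]
  simp only [List.nil_append]
  rw [pv_zip_bad]
  rw [show (PySem.Dict.mk (dct.map pvG)) = PySem.Dict.mk ([] ++ dct.map pvG) from rfl]
  rw [pv_pass2_outer dct [] hnodup0 h2]
  simp only [List.nil_append, List.map_map]
  apply List.map_congr_left
  intro p hp
  simp only [Function.comp_def, pvH]
  rw [pv_filterMap_if]
  congr 1
  rw [List.map_map]
  apply List.map_congr_left
  intro q hq
  obtain ⟨hqm, hqd⟩ := List.mem_filter.mp hq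
  simp only [Function.comp_def, pvConv]
  rw [if_pos (by simpa using hqd)]
  rfl

-- ===== VERDICT (by name: the statement is the Claim_ definition above) =====
theorem find_and_remove_spec : Claim_equal_find_and_remove := by
  intro dct _ hpre
  unfold Spec_find_and_remove
  exact pv_main dct hpre.1 hpre.2
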